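-- pv_equiv track=rewrite | github.com/kevinxu-git/MidtermGroupProject_word2vec | to_submit/stochastic_gradient_descent_group8_anglais.py | create_dictionary
-- ===== SOURCE A (Python) =====
-- def create_dictionary(list_of_sentences):
--     words = []
--     for sentence in list_of_sentences:
--         for word in sentence:
--             if word not in words:
--                 words.append(word)
--
--     int2word = {}
--     word2int = {}
--     for i, word in enumerate(words):
--         word2int[word] = i
--         int2word[i] = word
--
--     return int2word, word2int
-- ===== SOURCE B (Python) =====
-- def create_dictionary(list_of_sentences):
--     flat = [w for s in list_of_sentences for w in s]
--     order = sorted(set(flat), key=flat.index)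
--     int2word = {i: w for i, w in enumerate(order)}
--     word2int = {w: i for i, w in enumerate(order)}
--     return int2word, word2int
-- ===== Notes on version B (the rewrite author's own statement) =====
-- stated objective: alternative
-- what changed: Replaces A's incremental list-scan dedup plus separate enumerate pass by a different algorithm: flatten all sentences, deduplicate via set(), stable-sort the distinct words by their first-occurrence index (flat.index), and build each dictionary with its own comprehension; correct because distinct words have distinct first-occurrence indices, so the sort reproduces A's first-seen order.
import Mathlib
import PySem

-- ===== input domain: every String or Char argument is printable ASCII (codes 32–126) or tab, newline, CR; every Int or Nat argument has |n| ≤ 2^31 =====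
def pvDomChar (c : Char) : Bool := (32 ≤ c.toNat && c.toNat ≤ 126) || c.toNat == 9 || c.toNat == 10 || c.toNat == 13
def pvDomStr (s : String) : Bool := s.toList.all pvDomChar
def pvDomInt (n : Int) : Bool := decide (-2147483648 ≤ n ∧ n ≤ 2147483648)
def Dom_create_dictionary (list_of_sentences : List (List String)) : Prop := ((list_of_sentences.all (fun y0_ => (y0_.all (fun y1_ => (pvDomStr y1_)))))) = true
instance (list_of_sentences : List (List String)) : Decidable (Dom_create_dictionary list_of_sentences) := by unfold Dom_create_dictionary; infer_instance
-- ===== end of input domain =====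

-- B replaces A's incremental list-scan dedup + enumerate pass by: flatten, dedup via set,
-- stable-sort the distinct words by first-occurrence index, then build each dict by a
-- comprehension; objective: alternative (a genuinely different algorithm of similar cost).

-- ===== PORT A =====
def create_dictionary (list_of_sentences : List (List String)) : (List (Int × String)) × (List (String × Int)) :=
  let words : List String :=
    list_of_sentences.foldl (fun ws sentence =>
      sentence.foldl (fun ws word => if word ∈ ws then ws else ws ++ [word]) ws) []
  let st : PySem.Dict Int String × PySem.Dict String Int :=
    (PySem.List.enumerate words).foldl (fun st p =>
      (st.1.insert p.1 p.2, st.2.insert p.2 p.1))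
      (PySem.Dict.empty, PySem.Dict.empty)
  (st.1.items, st.2.items)

-- ===== PORT B =====
-- sorted(set(flat), key=flat.index): the keys are distinct first-occurrence indices, so the
-- result does not depend on the set's iteration order; every word of the set occurs in flat,
-- so Python's flat.index never raises — '.getD 0' is never reached.
def create_dictionary_alt (list_of_sentences : List (List String)) : (List (Int × String)) × (List (String × Int)) :=
  let flat : List String := list_of_sentences.flatMap (fun sentence => sentence)
  let order : List String :=
    PySem.List.sorted (PySem.Set.ofList flat) (fun w => (PySem.List.index? flat w).getD 0) false
  let int2word : PySem.Dict Int String :=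
    (PySem.List.enumerate order).foldl (fun d p => d.insert p.1 p.2) PySem.Dict.empty
  let word2int : PySem.Dict String Int :=
    (PySem.List.enumerate order).foldl (fun d p => d.insert p.2 p.1) PySem.Dict.empty
  (int2word.items, word2int.items)

-- ===== PRECONDITION & SPEC =====
def Spec_create_dictionary (list_of_sentences : List (List String)) (out : (List (Int × String)) × (List (String × Int))) : Prop := out = create_dictionary_alt list_of_sentences
instance (list_of_sentences : List (List String)) (out : (List (Int × String)) × (List (String × Int))) : Decidable (Spec_create_dictionary list_of_sentences out) := by unfold Spec_create_dictionary; infer_instance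

-- ===== CLAIM (what is proved, stated in full; the proofs are below) =====
def Claim_equal_create_dictionary : Prop := ∀ (list_of_sentences : List (List String)), Dom_create_dictionary list_of_sentences → Spec_create_dictionary list_of_sentences (create_dictionary list_of_sentences)

-- ===== LEMMAS AND PROOFS =====

-- A's dedup loop over the sentences is Set.ofList of the flattened word list
lemma pvWordsA_eq (ls : List (List String)) :
    ls.foldl (fun ws sentence =>
      sentence.foldl (fun ws word => if word ∈ ws then ws else ws ++ [word]) ws) []
    = PySem.Set.ofList (ls.flatMap (fun sentence => sentence)) := by
  have h1 : ∀ (ws sentence : List String),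
      sentence.foldl (fun ws word => if word ∈ ws then ws else ws ++ [word]) ws
        = sentence.foldl PySem.Set.add ws := by
    intro ws s
    exact PySem.List.foldl_congr_mem s _ _ ws (fun acc x _ => (PySem.Set.add_eq_ite acc x).symm)
  simp only [h1]
  have hfm : ls.flatMap (fun sentence => sentence) = ls.flatten := by
    simp
  rw [PySem.Set.ofList_eq_foldl, hfm, List.foldl_flatten]

-- the first-insertion-order set list is strictly increasing under first-occurrence index
lemma pvPairwise_idx (flat : List String) :
    (PySem.Set.ofList flat).Pairwise
      (fun a b => ((PySem.List.index? flat a).getD 0 : Nat) < (PySem.List.index? flat b).getD 0) := by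
  induction flat using List.reverseRecOn with
  | nil => simp [PySem.Set.ofList]
  | append_singleton xs x ih =>
      have hof : PySem.Set.ofList (xs ++ [x]) = (PySem.Set.ofList xs).add x := by
        rw [PySem.Set.ofList_eq_foldl, List.foldl_append, ← PySem.Set.ofList_eq_foldl]
        rfl
      have hkey : ∀ a ∈ xs, PySem.List.index? (xs ++ [x]) a = PySem.List.index? xs a :=
        fun a ha => PySem.List.index?_append_of_mem [x] ha
      rw [hof, PySem.Set.add_eq_ite]
      by_cases hx : x ∈ PySem.Set.ofList xs
      · simp only [hx, if_true]
        refine ih.imp_of_mem ?_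
        intro a b ha hb h
        rw [hkey a ((PySem.Set.mem_ofList xs a).mp ha),
            hkey b ((PySem.Set.mem_ofList xs b).mp hb)]
        exact h
      · simp only [hx, if_false]
        have hxnot : x ∉ xs := fun h => hx ((PySem.Set.mem_ofList xs x).mpr h)
        rw [List.pairwise_append]
        refine ⟨ih.imp_of_mem ?_, List.pairwise_singleton _ _, ?_⟩
        · intro a b ha hb h
          rw [hkey a ((PySem.Set.mem_ofList xs a).mp ha),
              hkey b ((PySem.Set.mem_ofList xs b).mp hb)]
          exact h
        · intro a ha b hb
          simp only [List.mem_singleton] at hb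
          rw [hb]
          have hax : a ∈ xs := (PySem.Set.mem_ofList xs a).mp ha
          rw [hkey a hax, PySem.List.index?_append_singleton_self xs x hxnot]
          obtain ⟨k, hk⟩ := Option.isSome_iff_exists.mp
            ((PySem.List.index?_isSome_iff xs a).mpr hax)
          obtain ⟨hklt, -, -⟩ := PySem.List.getElem_of_index?_eq_some hk
          rw [PySem.List.index?_eq_idxOf?] at hk
          simp [hk, hklt]

lemma pvSorted_ofList (flat : List String) :
    PySem.List.sorted (PySem.Set.ofList flat) (fun w => (PySem.List.index? flat w).getD 0) false
      = PySem.Set.ofList flat :=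
  PySem.List.sorted_eq_of_perm_of_pairwise_lt _ _ _ (List.Perm.refl _) (pvPairwise_idx flat)

-- ===== VERDICT (by name: the statement is the Claim_ definition above) =====
theorem create_dictionary_spec : Claim_equal_create_dictionary := by
  intro ls _
  unfold Spec_create_dictionary create_dictionary create_dictionary_alt
  dsimp only
  rw [pvWordsA_eq, pvSorted_ofList,
      PySem.List.foldl_prod_mk (f := fun d (p : Int × String) => PySem.Dict.insert d p.1 p.2)
        (g := fun d (p : Int × String) => PySem.Dict.insert d p.2 p.1)]
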